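-- pv_equiv track=rewrite | github.com/affilpm/data-structures | Data-Structure-2/Stack/stack.py | middle_stack
-- ===== SOURCE A (Python) =====
-- def middle_stack(arr):
--     mid = len(arr)//2
--     d = []
--     for i in range(mid):
--         d.append(arr.pop())
--     arr.pop()
--     for j in range(len(d)):
--         arr.append(d.pop())
--     return arr
-- ===== SOURCE B (Python) =====
-- def middle_stack(arr):
--     del arr[len(arr) - len(arr)//2 - 1]
--     return arr
-- ===== Notes on version B (the rewrite author's own statement) =====
-- stated objective: simpler
-- what changed: Replaces the two pop/append juggling loops and the auxiliary stack with a single indexed deletion at the directly computed middle position len(arr)-len(arr)//2-1, mutating the list in place like A.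
-- outside the precondition, e.g. on middle_stack([]): A raises IndexError, B raises IndexError
import Mathlib
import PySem

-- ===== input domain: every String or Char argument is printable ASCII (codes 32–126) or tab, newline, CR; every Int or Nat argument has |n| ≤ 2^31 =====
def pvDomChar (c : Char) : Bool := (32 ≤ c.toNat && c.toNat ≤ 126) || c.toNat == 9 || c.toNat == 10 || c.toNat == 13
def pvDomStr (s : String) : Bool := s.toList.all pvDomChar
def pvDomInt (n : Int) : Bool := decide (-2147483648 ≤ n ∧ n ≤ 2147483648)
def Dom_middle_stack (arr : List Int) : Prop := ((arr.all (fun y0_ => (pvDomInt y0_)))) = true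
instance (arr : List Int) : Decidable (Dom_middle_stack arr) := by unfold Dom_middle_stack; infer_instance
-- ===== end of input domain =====

-- B replaces A's two pop/append loops and auxiliary stack with one indexed deletion at the
-- directly computed middle index (objective: simpler). Both A and B mutate the argument list
-- in place in Python; the equivalence proved here is about the returned value.

-- ===== PORT A =====
-- first loop: for i in range(mid): d.append(arr.pop())
def popLoopA : Nat → List Int → List Int → List Int × List Int
  | 0, arr, d => (arr, d)
  | n + 1, arr, d => popLoopA n arr.dropLast (d ++ [arr.getLast!])

-- second loop: for j in range(len(d)): arr.append(d.pop())
def pushLoopA : Nat → List Int → List Int → List Int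
  | 0, arr, _ => arr
  | n + 1, arr, d => pushLoopA n (arr ++ [d.getLast!]) d.dropLast

def middle_stack (arr : List Int) : List Int :=
  let mid := arr.length / 2
  let (arr1, d) := popLoopA mid arr []
  let arr2 := arr1.dropLast          -- arr.pop()  (discarding the middle value)
  pushLoopA d.length arr2 d

-- ===== PORT B =====
def middle_stack_alt (arr : List Int) : List Int :=
  let idx : Int := (arr.length : Int) - PySem.Int.floordiv (arr.length : Int) 2 - 1
  arr.take idx.toNat ++ arr.drop (idx.toNat + 1)   -- del arr[idx] (idx ≥ 0 whenever arr ≠ [])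

-- ===== PRECONDITION & SPEC =====
-- Pre_ excludes only the empty list, on which Python A raises IndexError (arr.pop() on []).
def Pre_middle_stack (arr : List Int) : Prop := arr ≠ []
instance (arr : List Int) : Decidable (Pre_middle_stack arr) := by unfold Pre_middle_stack; infer_instance
def pvWitness_middle_stack : List Int := [1, 2, 3]

def Spec_middle_stack (arr : List Int) (out : List Int) : Prop := out = middle_stack_alt arr
instance (arr : List Int) (out : List Int) : Decidable (Spec_middle_stack arr out) := by unfold Spec_middle_stack; infer_instance

-- ===== CLAIM (what is proved, stated in full; the proofs are below) =====
def Claim_equal_middle_stack : Prop := ∀ (arr : List Int), Dom_middle_stack arr → Pre_middle_stack arr → Spec_middle_stack arr (middle_stack arr)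

-- ===== LEMMAS AND PROOFS =====

-- A's first loop pops the last k elements of arr onto d (reversed).
theorem popLoopA_spec (k : Nat) (xs ys d : List Int) (h : ys.length = k) :
    popLoopA k (xs ++ ys) d = (xs, d ++ ys.reverse) := by
  induction k generalizing ys d with
  | zero =>
    have : ys = [] := List.length_eq_zero_iff.mp h
    subst this; simp [popLoopA]
  | succ n ih =>
    rcases ys.eq_nil_or_concat with rfl | ⟨zs, a, rfl⟩
    · simp at h
    · simp only [List.concat_eq_append] at h ⊢
      have h1 : (xs ++ (zs ++ [a])).dropLast = xs ++ zs := by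
        rw [← List.append_assoc]; simp
      have h2 : (xs ++ (zs ++ [a])).getLast! = a := by
        rw [← List.append_assoc]
        simp [List.getLast!_eq_getLast?_getD, List.getLast?_append]
      simp only [popLoopA]
      rw [h1, h2, ih zs (d ++ [a]) (by simpa using h)]
      simp

-- A's second loop pops all of d back onto arr (so appends d reversed).
theorem pushLoopA_spec (k : Nat) (arr d : List Int) (h : d.length = k) :
    pushLoopA k arr d = arr ++ d.reverse := by
  induction k generalizing arr d with
  | zero =>
    have : d = [] := List.length_eq_zero_iff.mp h
    subst this; simp [pushLoopA]
  | succ n ih =>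
    rcases d.eq_nil_or_concat with rfl | ⟨zs, a, rfl⟩
    · simp at h
    · simp only [List.concat_eq_append] at h ⊢
      have h2 : (zs ++ [a]).getLast! = a := by
        simp [List.getLast!_eq_getLast?_getD, List.getLast?_append]
      have h3 : (zs ++ [a]).dropLast = zs := by simp
      simp only [pushLoopA]
      rw [h2, h3, ih (arr ++ [a]) zs (by simpa using h)]
      simp

-- ===== VERDICT (by name: the statement is the Claim_ definition above) =====
theorem middle_stack_spec : Claim_equal_middle_stack := by
  intro arr _ hpre
  unfold Spec_middle_stack middle_stack middle_stack_alt
  have hn : 0 < arr.length := List.length_pos_iff.mpr hpre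
  set n := arr.length with hnn
  have hmid : n / 2 ≤ n := Nat.div_le_self n 2
  -- split arr at position n - n/2
  have hsplit : arr = arr.take (n - n / 2) ++ arr.drop (n - n / 2) :=
    (List.take_append_drop _ _).symm
  have hdlen : (arr.drop (n - n / 2)).length = n / 2 := by
    simp [hnn]; omega
  have hp : popLoopA (n / 2) arr [] =
      (arr.take (n - n / 2), [] ++ (arr.drop (n - n / 2)).reverse) := by
    conv_lhs => rw [hsplit]
    exact popLoopA_spec _ _ _ _ hdlen
  simp only [hp]
  have hrlen : ((arr.drop (n - n / 2)).reverse).length = n / 2 := by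
    simp [hdlen]
  rw [List.nil_append, pushLoopA_spec _ _ _ rfl, List.reverse_reverse]
  -- left side is take (n - n/2) |>.dropLast ++ drop (n - n/2)
  have hfd : PySem.Int.floordiv (n : Int) 2 = ((n / 2 : Nat) : Int) := by
    exact_mod_cast PySem.Int.floordiv_natCast n 2
  have hidx : ((n : Int) - PySem.Int.floordiv (n : Int) 2 - 1).toNat = n - n / 2 - 1 := by
    rw [hfd]; omega
  rw [hidx]
  have htl : (arr.take (n - n / 2)).dropLast = arr.take (n - n / 2 - 1) := by
    rw [List.dropLast_eq_take, List.take_take, List.length_take]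
    congr 1; omega
  have hdr : arr.drop (n - n / 2) = arr.drop (n - n / 2 - 1 + 1) := by
    congr 1; omega
  rw [htl, hdr]
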